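-- pv_equiv track=rewrite | github.com/kohmaruworks/physics-gnn-surrogate-act | demo2_category_multiphysics.py | chain_spring_damper_topology
-- ===== SOURCE A (Python) =====
-- def chain_spring_damper_topology(num_nodes: int) -> tuple[list[tuple[int, int]], list[tuple[int, int]]]:
--     """
--     偶数ノードの直列チェーン: (0-1),(2-3),… をバネ、(1-2),(3-4),… をダンパー。
--     """
--     if num_nodes < 4 or num_nodes % 2 != 0:
--         raise ValueError("num_nodes must be even and >= 4")
--     springs: list[tuple[int, int]] = []
--     dampers: list[tuple[int, int]] = []
--     for i in range(0, num_nodes - 1, 2):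
--         springs.append((i, i + 1))
--     for i in range(1, num_nodes - 1, 2):
--         dampers.append((i, i + 1))
--     return springs, dampers
-- ===== SOURCE B (Python) =====
-- def chain_spring_damper_topology(num_nodes: int) -> tuple[list[tuple[int, int]], list[tuple[int, int]]]:
--     if num_nodes < 4 or num_nodes % 2 != 0:
--         raise ValueError("num_nodes must be even and >= 4")
--     springs: list[tuple[int, int]] = []
--     dampers: list[tuple[int, int]] = []
--     for i in range(num_nodes - 1):
--         if i % 2 == 0:
--             springs.append((i, i + 1))
--         else:
--             dampers.append((i, i + 1))
--     return springs, dampers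
-- ===== Notes on version B (the rewrite author's own statement) =====
-- stated objective: simpler
-- what changed: Replaces A's two strided range scans (step-2 starting at 0 and at 1) by one single pass over all consecutive pairs that distributes each pair by the parity of its left endpoint.
import Mathlib
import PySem

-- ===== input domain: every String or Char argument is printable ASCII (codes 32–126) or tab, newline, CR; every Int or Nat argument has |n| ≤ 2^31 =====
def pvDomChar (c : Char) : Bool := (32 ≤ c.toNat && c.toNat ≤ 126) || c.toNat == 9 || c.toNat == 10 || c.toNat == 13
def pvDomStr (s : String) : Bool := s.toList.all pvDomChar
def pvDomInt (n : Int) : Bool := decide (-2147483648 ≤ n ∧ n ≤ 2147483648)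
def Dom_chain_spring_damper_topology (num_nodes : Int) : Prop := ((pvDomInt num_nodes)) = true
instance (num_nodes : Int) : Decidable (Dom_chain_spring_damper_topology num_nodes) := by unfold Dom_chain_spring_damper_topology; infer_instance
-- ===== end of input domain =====

-- B replaces A's two strided range scans by one single pass over all consecutive
-- pairs, distributing each pair by the parity of its left endpoint (objective: simpler).

-- ===== PORT A =====
-- A raises ValueError when num_nodes < 4 or num_nodes is odd; those inputs are outside Pre_.
def chain_spring_damper_topology (num_nodes : Int) :
    (List (Int × Int)) × (List (Int × Int)) :=
  if num_nodes < 4 ∨ PySem.Int.mod num_nodes 2 ≠ 0 then ([], [])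
  else
    let springs := (PySem.List.pyRange 0 (num_nodes - 1) 2).foldl
      (fun acc i => acc ++ [(i, i + 1)]) []
    let dampers := (PySem.List.pyRange 1 (num_nodes - 1) 2).foldl
      (fun acc i => acc ++ [(i, i + 1)]) []
    (springs, dampers)

-- ===== PORT B =====
def chain_spring_damper_topology_alt (num_nodes : Int) :
    (List (Int × Int)) × (List (Int × Int)) :=
  if num_nodes < 4 ∨ PySem.Int.mod num_nodes 2 ≠ 0 then ([], [])
  else
    (PySem.List.pyRange 0 (num_nodes - 1) 1).foldl
      (fun (sd : (List (Int × Int)) × (List (Int × Int))) i =>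
        if PySem.Int.mod i 2 = 0 then (sd.1 ++ [(i, i + 1)], sd.2)
        else (sd.1, sd.2 ++ [(i, i + 1)]))
      ([], [])

-- ===== PRECONDITION & SPEC =====
-- Pre_ excludes exactly the inputs on which the Python A raises ValueError (num_nodes < 4 or odd).
def Pre_chain_spring_damper_topology (num_nodes : Int) : Prop :=
  4 ≤ num_nodes ∧ PySem.Int.mod num_nodes 2 = 0
instance (num_nodes : Int) : Decidable (Pre_chain_spring_damper_topology num_nodes) := by
  unfold Pre_chain_spring_damper_topology; infer_instance
def pvWitness_chain_spring_damper_topology : Int := (6)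
def Spec_chain_spring_damper_topology (num_nodes : Int) (out : (List (Int × Int)) × (List (Int × Int))) : Prop := out = chain_spring_damper_topology_alt num_nodes
instance (num_nodes : Int) (out : (List (Int × Int)) × (List (Int × Int))) : Decidable (Spec_chain_spring_damper_topology num_nodes out) := by unfold Spec_chain_spring_damper_topology; infer_instance

-- ===== CLAIM (what is proved, stated in full; the proofs are below) =====
def Claim_equal_chain_spring_damper_topology : Prop := ∀ (num_nodes : Int), Dom_chain_spring_damper_topology num_nodes → Pre_chain_spring_damper_topology num_nodes → Spec_chain_spring_damper_topology num_nodes (chain_spring_damper_topology num_nodes)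

-- ===== LEMMAS AND PROOFS =====

theorem pymod_two (n : Int) : PySem.Int.mod n 2 = n % 2 := by
  simp [PySem.Int.mod, Int.fmod_eq_emod]

-- closed forms of the two sides over a bound of the shape 2m+1
theorem springs_closed (m : Nat) :
    (PySem.List.pyRange 0 (2 * (m : Int) + 1) 2).map (fun i => (i, i + 1)) =
      (List.range (m + 1)).map (fun k : Nat => ((2 * (k : Int)), 2 * (k : Int) + 1)) := by
  rw [PySem.List.pyRange_of_pos 0 (2 * (m : Int) + 1) (by norm_num)]
  rw [List.map_map]
  have hb : (0 : Int) < 2 * (m : Int) + 1 := by positivity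
  rw [if_pos hb]
  have : ((2 * (m : Int) + 1 - 0 + 2 - 1) / 2).toNat = m + 1 := by omega
  rw [this]
  apply List.map_congr_left
  intro k _
  simp [Function.comp]

theorem dampers_closed (m : Nat) :
    (PySem.List.pyRange 1 (2 * (m : Int) + 1) 2).map (fun i => (i, i + 1)) =
      (List.range m).map (fun k : Nat => ((2 * (k : Int) + 1), 2 * (k : Int) + 2)) := by
  rw [PySem.List.pyRange_of_pos 1 (2 * (m : Int) + 1) (by norm_num)]
  rw [List.map_map]
  by_cases hm : m = 0
  · subst hm; norm_num
  · have hb : (1 : Int) < 2 * (m : Int) + 1 := by omega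
    rw [if_pos hb]
    have : ((2 * (m : Int) + 1 - 1 + 2 - 1) / 2).toNat = m := by omega
    rw [this]
    apply List.map_congr_left
    intro k _
    simp [Function.comp]
    constructor <;> ring

-- B's single parity-branched pass, characterised over a bound of the shape 2m+1
theorem fold_parity (m : Nat) (s d : List (Int × Int)) :
    (PySem.List.pyRange 0 (2 * (m : Int) + 1) 1).foldl
      (fun (sd : (List (Int × Int)) × (List (Int × Int))) i =>
        if PySem.Int.mod i 2 = 0 then (sd.1 ++ [(i, i + 1)], sd.2)
        else (sd.1, sd.2 ++ [(i, i + 1)]))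
      (s, d) =
    (s ++ (List.range (m + 1)).map (fun k : Nat => ((2 * (k : Int)), 2 * (k : Int) + 1)),
     d ++ (List.range m).map (fun k : Nat => ((2 * (k : Int) + 1), 2 * (k : Int) + 2))) := by
  induction m generalizing s d with
  | zero =>
      rw [show (2 * ((0 : Nat) : Int) + 1) = 0 + 1 by norm_num,
        PySem.List.pyRange_one_singleton]
      simp [pymod_two]
  | succ m ih =>
      have hcast : (2 * ((m + 1 : Nat) : Int) + 1) = (2 * (m : Int) + 1) + 2 := by
        push_cast; ring
      have hsplit : PySem.List.pyRange 0 (2 * ((m + 1 : Nat) : Int) + 1) 1 =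
          PySem.List.pyRange 0 (2 * (m : Int) + 1) 1 ++
            [2 * (m : Int) + 1, 2 * (m : Int) + 2] := by
        rw [hcast, PySem.List.pyRange_one_append 0 (2 * (m : Int) + 1) (2 * (m : Int) + 1 + 2)
          (by omega) (by omega)]
        congr 1
        rw [PySem.List.pyRange_one_cons (by omega), PySem.List.pyRange_one_cons (by omega),
          PySem.List.pyRange_one_eq_nil (by omega)]
        norm_num
        omega
      rw [hsplit, List.foldl_append, ih]
      have hodd : PySem.Int.mod (2 * (m : Int) + 1) 2 = 1 := by rw [pymod_two]; omega
      have heven : PySem.Int.mod (2 * (m : Int) + 2) 2 = 0 := by rw [pymod_two]; omega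
      simp only [List.foldl_cons, List.foldl_nil, hodd, heven, one_ne_zero, if_false, if_true]
      rw [List.range_succ (n := m + 1), List.range_succ (n := m)]
      simp only [List.map_append, List.map_cons, List.map_nil, List.append_assoc,
        Prod.mk.injEq]
      constructor <;> (congr 2 <;> push_cast <;> try ring)

-- ===== VERDICT (by name: the statement is the Claim_ definition above) =====
theorem chain_spring_damper_topology_spec : Claim_equal_chain_spring_damper_topology := by
  intro n _ hpre
  obtain ⟨h4, heven⟩ := hpre
  rw [pymod_two] at heven
  -- n = 2*m + 3 + 1 for some m ≥ 0, i.e. n - 1 = 2*(m+1) + 1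
  obtain ⟨m, hm⟩ : ∃ m : Nat, n - 1 = 2 * (m : Int) + 1 := by
    refine ⟨((n - 2) / 2).toNat, ?_⟩; omega
  unfold Spec_chain_spring_damper_topology
  unfold chain_spring_damper_topology chain_spring_damper_topology_alt
  rw [if_neg (by rw [pymod_two]; omega), if_neg (by rw [pymod_two]; omega)]
  simp only [hm]
  rw [PySem.List.foldl_append_singleton_eq_map, PySem.List.foldl_append_singleton_eq_map,
    fold_parity, springs_closed, dampers_closed]
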